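-- pv_equiv track=rewrite | github.com/Lokesh915/Problem-solving | BirthdayChocolate(HackerRank).py | birthday
-- ===== SOURCE A (Python) =====
-- def birthday(s, d, m):
--
--     count=0
--
--     for i in range(len(s)):
--         total=0
--         total=total+sum(s[i:i+m])
--         if total==d:
--             count+=1
--
--     return count
-- ===== SOURCE B (Python) =====
-- def birthday(s, d, m):
--     # prefix sums: each window sum is a difference of two prefix sums
--     n = len(s)
--     pref = [0]
--     t = 0
--     for x in s:
--         t += x
--         pref.append(t)
--     count = 0
--     for i in range(n):
--         if pref[min(i + m, n)] - pref[i] == d: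
--             count += 1
--     return count
-- ===== Notes on version B (the rewrite author's own statement) =====
-- stated objective: faster
-- what changed: B builds a prefix-sum list once and tests each window sum as a difference of two prefix sums instead of re-summing a slice per position; Pre_ excludes negative m (a negative segment length is outside the task's natural domain, where A's Python slice semantics are accidental).
-- outside the precondition, e.g. on birthday([1, 2, 3], 0, -1): A returns 2, B returns 0
import Mathlib
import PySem

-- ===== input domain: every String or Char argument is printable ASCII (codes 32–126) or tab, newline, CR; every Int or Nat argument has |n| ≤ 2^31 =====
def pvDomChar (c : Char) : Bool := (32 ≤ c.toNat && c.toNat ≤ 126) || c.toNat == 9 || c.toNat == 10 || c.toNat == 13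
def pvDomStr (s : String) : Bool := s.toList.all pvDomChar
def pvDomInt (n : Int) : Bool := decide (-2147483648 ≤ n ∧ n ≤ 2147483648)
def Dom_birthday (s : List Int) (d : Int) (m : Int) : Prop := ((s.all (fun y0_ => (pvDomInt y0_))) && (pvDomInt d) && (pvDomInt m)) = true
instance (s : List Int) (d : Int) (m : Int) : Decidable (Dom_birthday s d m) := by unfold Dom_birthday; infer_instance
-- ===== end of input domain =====

-- B replaces A's per-position slice re-summation with one prefix-sum pass and an
-- O(1) subtraction per window; return values proved equal for m ≥ 0.


-- ===== PORT A =====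
-- literal port of A: for i in range(len(s)): total = 0 + sum(s[i:i+m]); if total==d: count+=1
def birthday (s : List Int) (d : Int) (m : Int) : Int :=
  (PySem.List.pyRange 0 s.length 1).foldl (fun count i =>
    let total : Int := 0
    let total := total + (PySem.List.slice s (some i) (some (i + m))).sum
    if total = d then count + 1 else count) 0

-- ===== PORT B =====
-- literal port of Source B: build the prefix-sum list `pref`, then one pass over range(n)
-- comparing pref[min(i+m, n)] - pref[i] with d (pyGetD matches Python list indexing
-- on every index the loop produces).
def birthday_alt (s : List Int) (d : Int) (m : Int) : Int :=
  let n : Int := s.length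
  let pref := (s.foldl (fun (acc : List Int × Int) x =>
      (acc.1 ++ [acc.2 + x], acc.2 + x)) ([0], 0)).1
  (PySem.List.pyRange 0 n 1).foldl (fun count i =>
    if PySem.List.pyGetD pref (min (i + m) n) 0 - PySem.List.pyGetD pref i 0 = d
    then count + 1 else count) 0

-- ===== PRECONDITION & SPEC =====
-- Pre_ excludes m < 0: a negative segment length is outside the task's natural domain,
-- and A's value there is an accident of Python's negative slice bounds.
def Pre_birthday (s : List Int) (d : Int) (m : Int) : Prop := 0 ≤ m
instance (s : List Int) (d : Int) (m : Int) : Decidable (Pre_birthday s d m) := by unfold Pre_birthday; infer_instance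
def pvWitness_birthday : List Int × Int × Int := ([1, 2, 1, 3, 2], 3, 2)

def Spec_birthday (s : List Int) (d : Int) (m : Int) (out : Int) : Prop := out = birthday_alt s d m
instance (s : List Int) (d : Int) (m : Int) (out : Int) : Decidable (Spec_birthday s d m out) := by unfold Spec_birthday; infer_instance

-- ===== CLAIM (what is proved, stated in full; the proofs are below) =====
def Claim_equal_birthday : Prop := ∀ (s : List Int) (d : Int) (m : Int), Dom_birthday s d m → Pre_birthday s d m → Spec_birthday s d m (birthday s d m)

-- ===== LEMMAS AND PROOFS =====

-- the prefix-sum loop of B builds exactly the list of prefix sums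
theorem pref_foldl (s : List Int) (acc : List Int) (t : Int) :
    (s.foldl (fun (a : List Int × Int) x => (a.1 ++ [a.2 + x], a.2 + x)) (acc, t)).1
      = acc ++ (List.range s.length).map (fun k => t + (s.take (k + 1)).sum) := by
  induction s generalizing acc t with
  | nil => simp
  | cons y ys ih =>
      simp only [List.foldl_cons, ih, List.length_cons, List.range_succ_eq_map]
      simp [List.map_map, Function.comp_def, List.append_assoc, add_assoc]

theorem pref_eq (s : List Int) :
    (s.foldl (fun (a : List Int × Int) x => (a.1 ++ [a.2 + x], a.2 + x)) (([0] : List Int), 0)).1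
      = (List.range (s.length + 1)).map (fun k => (s.take k).sum) := by
  rw [pref_foldl, List.range_succ_eq_map]
  simp [List.map_map, Function.comp_def]

theorem pref_get (s : List Int) (k : Nat) (hk : k ≤ s.length) :
    PySem.List.pyGetD
      ((List.range (s.length + 1)).map (fun k => (s.take k).sum)) (k : Int) 0
      = (s.take k).sum := by
  rw [PySem.List.pyGetD_natCast]
  rw [List.getD_eq_getElem?_getD]
  simp [List.getElem?_map, List.getElem?_range (by omega : k < s.length + 1)]

-- sum of a middle segment as a difference of prefix sums
theorem sum_drop_take (s : List Int) (a b : Nat) :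
    ((s.drop a).take b).sum = (s.take (a + b)).sum - (s.take a).sum := by
  rw [List.take_add, List.sum_append]; ring

theorem birthday_spec_aux (s : List Int) (d : Int) (m : Int) (hm : 0 ≤ m) :
    birthday s d m = birthday_alt s d m := by
  unfold birthday birthday_alt
  simp only [pref_eq]
  apply PySem.List.foldl_congr_mem
  intro acc i hi
  rw [PySem.List.mem_pyRange_one] at hi
  obtain ⟨hi0, hin⟩ := hi
  simp only [zero_add]
  have hslice : PySem.List.slice s (some i) (some (i + m))
      = (s.drop (PySem.List.clampIdx s.length i)).take
          (PySem.List.clampIdx s.length (i + m) - PySem.List.clampIdx s.length i) := by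
    simp [PySem.List.slice]
  have hclampi : PySem.List.clampIdx s.length i = i.toNat := by
    simp only [PySem.List.clampIdx]
    split_ifs <;> omega
  have hclamph : ((PySem.List.clampIdx s.length (i + m) : Nat) : Int)
      = min (i + m) (s.length : Int) := by
    simp only [PySem.List.clampIdx]
    split_ifs <;> push_cast <;> omega
  have hhle : PySem.List.clampIdx s.length (i + m) ≤ s.length := by
    simp only [PySem.List.clampIdx]; split_ifs <;> omega
  rw [hslice, hclampi, ← hclamph]
  set h : Nat := PySem.List.clampIdx s.length (i + m) with hh
  have hge : i.toNat ≤ h := by omega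
  have hiInt : ((i.toNat : Nat) : Int) = i := by omega
  rw [pref_get s h hhle, ← hiInt, pref_get s i.toNat (by omega)]
  have hmax : i.toNat + (h - i.toNat) = h := by omega
  rw [sum_drop_take]
  simp only [Int.toNat_natCast, hmax]

-- ===== VERDICT (by name: the statement is the Claim_ definition above) =====
theorem birthday_spec : Claim_equal_birthday := by
  intro s d m _ hm
  unfold Spec_birthday
  exact birthday_spec_aux s d m hm
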